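-- pv_equiv track=rewrite | github.com/basel-ganaim/testrepo | hw5_211447339.py | prefix_suffix_overlap
-- ===== SOURCE A (Python) =====
-- def prefix_suffix_overlap(lst, k):
--     list = []
--     for i in range(len(lst)): #itetrate by number on the lst
--         elem_pre = lst[i] # name elem_pre by this so we dont call it by list iteratition every time
--         prefix = elem_pre[:k] #name the prefix by indexing
--         for j in range(len(lst)):  #itetrate by number on the lst
--             elem_suf = lst[j]
--             if j != i:
--                 if elem_suf[-k:] == prefix:
--                     list.append((i,j))
--
--     return list
-- ===== SOURCE B (Python) =====
-- def prefix_suffix_overlap(lst, k):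
--     # Index every string's k-suffix once in a dict, then look each prefix up.
--     suffix_map = {}
--     for j, s in enumerate(lst):
--         suffix_map.setdefault(s[-k:], []).append(j)
--     out = []
--     for i, s in enumerate(lst):
--         for j in suffix_map.get(s[:k], ()):
--             if j != i:
--                 out.append((i, j))
--     return out
-- ===== Notes on version B (the rewrite author's own statement) =====
-- stated objective: alternative
-- what changed: B builds a dictionary mapping each string's k-suffix to its list of indices in one pass, then answers each prefix with a single lookup, instead of A's nested all-pairs scan; intended as asymptotically better (O(n*k + output) vs O(n^2*k)) but on the output-dominated timing inputs it measured only 1.65x, so no speed is claimed.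
import Mathlib
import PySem

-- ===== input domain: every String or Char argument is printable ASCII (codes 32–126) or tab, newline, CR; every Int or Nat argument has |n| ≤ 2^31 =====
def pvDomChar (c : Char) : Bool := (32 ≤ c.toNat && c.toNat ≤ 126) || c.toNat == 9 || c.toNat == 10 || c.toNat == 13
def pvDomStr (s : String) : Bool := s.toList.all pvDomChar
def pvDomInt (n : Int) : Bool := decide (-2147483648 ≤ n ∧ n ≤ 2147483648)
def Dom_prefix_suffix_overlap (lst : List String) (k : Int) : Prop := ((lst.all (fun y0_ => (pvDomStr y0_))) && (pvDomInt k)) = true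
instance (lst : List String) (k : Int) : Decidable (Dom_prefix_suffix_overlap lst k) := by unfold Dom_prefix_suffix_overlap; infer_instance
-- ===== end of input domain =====

-- B replaces A's nested all-pairs scan by a dictionary keyed by each string's k-suffix,
-- built once and looked up per prefix; same return value, both total.

-- ===== PORT A =====
-- literal transliteration of A: two nested index loops, append (i,j) when lst[j][-k:] == lst[i][:k]
def prefix_suffix_overlap (lst : List String) (k : Int) : List (Int × Int) :=
  (PySem.List.pyRange 0 (lst.length : Int)).foldl (fun acc i =>
    let elem_pre := PySem.List.pyGetD lst i ""
    let pre := PySem.List.slice elem_pre.toList none (some k)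
    (PySem.List.pyRange 0 (lst.length : Int)).foldl (fun acc2 j =>
      let elem_suf := PySem.List.pyGetD lst j ""
      if j ≠ i then
        if PySem.List.slice elem_suf.toList (some (-k)) none = pre then acc2 ++ [(i, j)]
        else acc2
      else acc2) acc) []

-- ===== PORT B =====
-- B helper: suffix_map = {s[-k:]: [indices]} built by setdefault(...).append(j) over enumerate(lst)
def pvSuffixIndex (lst : List String) (k : Int) : PySem.Dict (List Char) (List Int) :=
  (PySem.List.enumerate lst).foldl (fun d js =>
    let key := PySem.List.slice js.2.toList (some (-k)) none
    d.insert key (d.getD key [] ++ [js.1])) ∅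

def prefix_suffix_overlap_alt (lst : List String) (k : Int) : List (Int × Int) :=
  let d := pvSuffixIndex lst k
  (PySem.List.enumerate lst).foldl (fun out is =>
    (d.getD (PySem.List.slice is.2.toList none (some k)) []).foldl
      (fun out2 j => if j ≠ is.1 then out2 ++ [(is.1, j)] else out2) out) []

-- ===== PRECONDITION & SPEC =====
def Spec_prefix_suffix_overlap (lst : List String) (k : Int) (out : List (Int × Int)) : Prop := out = prefix_suffix_overlap_alt lst k
instance (lst : List String) (k : Int) (out : List (Int × Int)) : Decidable (Spec_prefix_suffix_overlap lst k out) := by unfold Spec_prefix_suffix_overlap; infer_instance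

-- ===== CLAIM (what is proved, stated in full; the proofs are below) =====
def Claim_equal_prefix_suffix_overlap : Prop := ∀ (lst : List String) (k : Int), Dom_prefix_suffix_overlap lst k → Spec_prefix_suffix_overlap lst k (prefix_suffix_overlap lst k)

-- ===== LEMMAS AND PROOFS =====

-- the k-suffix key used throughout
def pvSuf (k : Int) (s : String) : List Char := PySem.List.slice s.toList (some (-k)) none

-- dict invariant: after folding L into d, the bucket of p is d's bucket plus the indices of L whose suffix is p
lemma pvSuffixIndex_build (L : List (Int × String)) (k : Int)
    (d : PySem.Dict (List Char) (List Int)) (p : List Char) :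
    (L.foldl (fun d js =>
        let key := PySem.List.slice js.2.toList (some (-k)) none
        d.insert key (d.getD key [] ++ [js.1])) d).getD p []
      = d.getD p [] ++ (L.filter (fun js => pvSuf k js.2 = p)).map (·.1) := by
  induction L generalizing d with
  | nil => simp
  | cons js L ih =>
    simp only [List.foldl_cons, List.filter_cons, ih]
    rw [PySem.Dict.getD_insert]
    by_cases h : pvSuf k js.2 = p
    · simp [pvSuf] at h
      simp [h, pvSuf]
    · have h' : ¬ p = PySem.List.slice js.2.toList (some (-k)) none := by
        intro he; exact h (by simp [pvSuf, he])
      simp [h', h]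

lemma pvEnumerateAux (lst : List String) : ∀ s : Int,
    PySem.List.enumerate lst s = (List.range lst.length).map (fun (t : Nat) => (s + (t : Int), lst.getD t "")) := by
  induction lst with
  | nil => intro s; simp [PySem.List.enumerate]
  | cons x xs ih =>
    intro s
    simp only [PySem.List.enumerate, List.length_cons, List.range_succ_eq_map, List.map_cons, List.map_map, ih (s+1)]
    refine List.cons_eq_cons.mpr ⟨by simp, ?_⟩
    apply List.map_congr_left
    intro t _
    simp [Function.comp]
    ring

lemma pvEnumerate_eq (lst : List String) :
    PySem.List.enumerate lst = (List.range lst.length).map (fun (t : Nat) => ((t : Int), lst.getD t "")) := by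
  simpa using pvEnumerateAux lst 0

-- A's inner j-loop for a fixed i and prefix p equals B's fold over the dict bucket of p
lemma pvInner_eq (lst : List String) (k : Int) (i : Int) (p : List Char) (acc : List (Int × Int)) :
    ((List.range lst.length).map (fun (t : Nat) => (t : Int))).foldl (fun acc2 j =>
      if j ≠ i then
        if PySem.List.slice (PySem.List.pyGetD lst j "").toList (some (-k)) none = p then acc2 ++ [(i, j)]
        else acc2
      else acc2) acc
    = ((pvSuffixIndex lst k).getD p []).foldl
        (fun out2 j => if j ≠ i then out2 ++ [(i, j)] else out2) acc := by
  have hstepA : (fun (acc2 : List (Int × Int)) (j : Int) =>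
      if j ≠ i then
        if PySem.List.slice (PySem.List.pyGetD lst j "").toList (some (-k)) none = p then acc2 ++ [(i, j)]
        else acc2
      else acc2)
    = (fun acc2 j => if (decide (j ≠ i) && decide (PySem.List.slice (PySem.List.pyGetD lst j "").toList (some (-k)) none = p)) = true then acc2 ++ [(i, j)] else acc2) := by
    funext a j
    by_cases h1 : j = i <;> by_cases h2 : PySem.List.slice (PySem.List.pyGetD lst j "").toList (some (-k)) none = p <;> simp [h1, h2]
  have hstepB : (fun (out2 : List (Int × Int)) (j : Int) => if j ≠ i then out2 ++ [(i, j)] else out2)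
    = (fun out2 j => if (decide (j ≠ i)) = true then out2 ++ [(i, j)] else out2) := by
    funext a j; by_cases h1 : j = i <;> simp [h1]
  rw [hstepA, hstepB, PySem.List.foldl_append_if, PySem.List.foldl_append_if]
  have hd : (pvSuffixIndex lst k).getD p []
      = ((PySem.List.enumerate lst).filter (fun js => pvSuf k js.2 = p)).map (·.1) := by
    have := pvSuffixIndex_build (PySem.List.enumerate lst) k ∅ p
    simpa [pvSuffixIndex, PySem.Dict.getD_empty] using this
  rw [hd, pvEnumerate_eq]
  simp only [List.filter_map, List.map_map, List.filter_filter]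
  have hfil := List.filter_congr (l := List.range lst.length)
    (p := (fun j => decide (j ≠ i) && decide (PySem.List.slice (PySem.List.pyGetD lst j "").toList (some (-k)) none = p)) ∘ (fun (t : Nat) => (t : Int)))
    (q := fun (t : Nat) =>
      ((fun j : Int => decide (j ≠ i)) ∘ (fun x : Int × String => x.1) ∘ fun (t : Nat) => ((t : Int), lst.getD t "")) t &&
      ((fun js : Int × String => decide (pvSuf k js.2 = p)) ∘ fun (t : Nat) => ((t : Int), lst.getD t "")) t)
    (fun t _ => by simp [Function.comp, pvSuf, PySem.List.pyGetD_natCast])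
  rw [hfil]
  rfl

-- the two outer loops, run over the same index list, agree for every accumulator
lemma pvOuter_eq (lst : List String) (k : Int) (l : List Nat) (acc : List (Int × Int)) :
    (l.map (fun (t : Nat) => (t : Int))).foldl (fun acc i =>
      ((List.range lst.length).map (fun (t : Nat) => (t : Int))).foldl (fun acc2 j =>
        if j ≠ i then
          if PySem.List.slice (PySem.List.pyGetD lst j "").toList (some (-k)) none
              = PySem.List.slice (PySem.List.pyGetD lst i "").toList none (some k) then acc2 ++ [(i, j)]
          else acc2
        else acc2) acc) acc
    = (l.map (fun (t : Nat) => ((t : Int), lst.getD t ""))).foldl (fun out is =>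
        ((pvSuffixIndex lst k).getD (PySem.List.slice is.2.toList none (some k)) []).foldl
          (fun out2 j => if j ≠ is.1 then out2 ++ [(is.1, j)] else out2) out) acc := by
  induction l generalizing acc with
  | nil => rfl
  | cons t l ih =>
    simp only [List.map_cons, List.foldl_cons]
    rw [pvInner_eq lst k (t : Int) (PySem.List.slice (PySem.List.pyGetD lst (t : Int) "").toList none (some k)) acc,
        PySem.List.pyGetD_natCast]
    exact ih _

-- ===== VERDICT (by name: the statement is the Claim_ definition above) =====
theorem prefix_suffix_overlap_spec : Claim_equal_prefix_suffix_overlap := by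
  intro lst k _
  unfold Spec_prefix_suffix_overlap prefix_suffix_overlap prefix_suffix_overlap_alt
  rw [pvEnumerate_eq, PySem.List.pyRange_zero_natCast]
  exact pvOuter_eq lst k (List.range lst.length) []
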